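-- pv_equiv track=rewrite | github.com/funnydog/AoC2019 | day24/day24.py | parse
-- ===== SOURCE A (Python) =====
-- def parse(txt):
--     bit = 1
--     bug = 0
--     for c in list(txt):
--         if c == "." or c == "?":
--             bit <<= 1
--         elif c == "#":
--             bug |= bit
--             bit <<= 1
--         else:
--             pass
--     return bug
-- ===== SOURCE B (Python) =====
-- def parse(txt):
--     cells = [c for c in txt if c in ".?#"]
--     s = "".join("1" if c == "#" else "0" for c in reversed(cells))
--     return int(s, 2) if s else 0
-- ===== Notes on version B (the rewrite author's own statement) =====
-- stated objective: simpler
-- what changed: Replaces the interleaved shift-and-OR loop state machine by two phases: filter the relevant cells, then parse the reversed 0/1 string with int(s, 2).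
import Mathlib
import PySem

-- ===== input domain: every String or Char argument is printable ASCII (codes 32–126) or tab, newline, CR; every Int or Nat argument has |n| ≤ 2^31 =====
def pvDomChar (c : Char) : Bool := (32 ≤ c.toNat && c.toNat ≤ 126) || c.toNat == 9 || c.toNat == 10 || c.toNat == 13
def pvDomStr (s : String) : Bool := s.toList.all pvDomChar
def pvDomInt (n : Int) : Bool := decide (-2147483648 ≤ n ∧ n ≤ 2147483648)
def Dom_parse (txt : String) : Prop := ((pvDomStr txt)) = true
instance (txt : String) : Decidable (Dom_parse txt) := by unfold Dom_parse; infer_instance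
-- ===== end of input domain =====

-- B replaces A's interleaved shift-and-OR loop by two phases: filter the relevant cells,
-- then parse the reversed 0/1 string as a binary integer (simpler decomposition, same cost).

-- ===== PORT A =====
-- state (bit, bug); 'bit <<= 1' is bit * 2 (exact for ints), 'bug |= bit' is PySem.Int.bor
def parse (txt : String) : Int :=
  (txt.toList.foldl
    (fun (st : Int × Int) c =>
      if c = '.' ∨ c = '?' then (st.1 * 2, st.2)
      else if c = '#' then (st.1 * 2, PySem.Int.bor st.2 st.1)
      else st)
    ((1 : Int), (0 : Int))).2

-- ===== PORT B =====
-- 'c in ".?#"' ported as char-list membership (c is a single char, so exact);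
-- int(s, 2) ported by hand as a base-2 accumulation fold — exact since s consists only of '0'/'1'
def parse_alt (txt : String) : Int :=
  let cells := txt.toList.filter (fun c => ['.', '?', '#'].contains c)
  let s := cells.reverse.map (fun c => if c = '#' then '1' else '0')
  if s = [] then 0
  else s.foldl (fun acc d => 2 * acc + (if d = '1' then (1 : Int) else 0)) 0

-- ===== PRECONDITION & SPEC =====
def Spec_parse (txt : String) (out : Int) : Prop := out = parse_alt txt
instance (txt : String) (out : Int) : Decidable (Spec_parse txt out) := by unfold Spec_parse; infer_instance

-- ===== CLAIM (what is proved, stated in full; the proofs are below) =====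
def Claim_equal_parse : Prop := ∀ (txt : String), Dom_parse txt → Spec_parse txt (parse txt)

-- ===== LEMMAS AND PROOFS =====

-- value of an (already filtered) cell list, first cell = least significant bit
def pvVal (l : List Char) : Int :=
  l.foldr (fun c acc => 2 * acc + (if c = '#' then (1 : Int) else 0)) 0

lemma pv_bor_pow (bug : Int) (k : Nat) (h0 : 0 ≤ bug) (h1 : bug < 2 ^ k) :
    PySem.Int.bor bug ((2 : Int) ^ k) = bug + 2 ^ k := by
  have hk : ((2 : Int) ^ k).toNat = 2 ^ k := by
    rw [show ((2:Int)^k) = ((2^k : Nat) : Int) by push_cast; ring]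
    exact Int.toNat_natCast _
  rw [PySem.Int.bor_of_nonneg h0 (by positivity), hk]
  have hb : bug.toNat < 2 ^ k := by omega
  have h2 : 2 ^ k + bug.toNat = 2 ^ k ||| bug.toNat := by
    simpa using Nat.two_pow_add_eq_or_of_lt (i := k) (b := bug.toNat) hb 1
  rw [Nat.lor_comm, ← h2]
  push_cast
  omega

lemma pvA_loop (l : List Char) : ∀ (k : Nat) (bug : Int), 0 ≤ bug → bug < 2 ^ k →
    (l.foldl
      (fun (st : Int × Int) c =>
        if c = '.' ∨ c = '?' then (st.1 * 2, st.2)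
        else if c = '#' then (st.1 * 2, PySem.Int.bor st.2 st.1)
        else st)
      (((2 : Int) ^ k), bug)).2
    = bug + 2 ^ k * pvVal (l.filter (fun c => ['.', '?', '#'].contains c)) := by
  induction l with
  | nil => intro k bug _ _; simp [pvVal]
  | cons c l ih =>
    intro k bug h0 h1
    have hp : (0 : Int) < 2 ^ k := by positivity
    have hpow : (2 : Int) ^ (k + 1) = 2 ^ k + 2 ^ k := by ring
    by_cases hd : c = '.' ∨ c = '?'
    · have hne : c ≠ '#' := by rcases hd with h | h <;> subst h <;> decide
      have hm : (['.', '?', '#'].contains c) = true := by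
        rcases hd with h | h <;> subst h <;> decide
      simp only [List.foldl, hd, if_true, List.filter, hm]
      have h2 : (2 : Int) ^ k * 2 = 2 ^ (k + 1) := by ring
      rw [h2, ih (k + 1) bug h0 (by linarith)]
      simp only [pvVal, List.foldr, hne, if_false]
      ring
    · by_cases hc : c = '#'
      · subst hc
        have hm : (['.', '?', '#'].contains '#') = true := by decide
        simp only [List.foldl, hd, if_false, if_true, List.filter, hm]
        rw [pv_bor_pow bug k h0 h1]
        have h2 : (2 : Int) ^ k * 2 = 2 ^ (k + 1) := by ring
        rw [h2, ih (k + 1) (bug + 2 ^ k) (by linarith) (by linarith)]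
        simp only [pvVal, List.foldr, if_true]
        ring
      · rcases not_or.mp hd with ⟨hd1, hd2⟩
        have hm : (['.', '?', '#'].contains c) = false := by
          simp [hd1, hd2, hc]
        simp only [List.foldl, hd, if_false, hc, List.filter, hm]
        exact ih k bug h0 h1

lemma pvB_eq (txt : String) :
    parse_alt txt = pvVal (txt.toList.filter (fun c => ['.', '?', '#'].contains c)) := by
  unfold parse_alt
  set cells := txt.toList.filter (fun c => ['.', '?', '#'].contains c) with hc
  by_cases h : cells.reverse.map (fun c => if c = '#' then '1' else '0') = []
  · simp only [List.map_eq_nil_iff, List.reverse_eq_nil_iff] at h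
    simp only [h]
    simp [pvVal]
  · simp only [h, if_false]
    rw [List.map_reverse, List.foldl_reverse, List.foldr_map]
    simp only [pvVal]
    congr 1
    funext c acc
    by_cases hcc : c = '#' <;> simp [hcc]

-- ===== VERDICT (by name: the statement is the Claim_ definition above) =====
theorem parse_spec : Claim_equal_parse := by
  intro txt _
  show parse txt = parse_alt txt
  rw [pvB_eq]
  unfold parse
  have h := pvA_loop txt.toList 0 0 (le_refl 0) (by norm_num)
  simpa using h
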